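-- pv_equiv track=rewrite | github.com/rahulbalaji13/PLACEMENT | LitCoder/Contest/mountainexplore.py | find_highest_mountain_peaks
-- ===== SOURCE A (Python) =====
-- def find_highest_mountain_peaks(heights):
--     """
--     Finds the total number of peaks on the highest mountains and their peak heights.
--
--     Args:
--         heights (list): List of integers representing mountain heights.
--
--     Returns:
--         int: Total number of peaks on the highest mountains.
--         list: Heights of the peaks.
--     """
--     # Edge case: List should have at least 3 elements
--     if len(heights) < 3:
--         return 0, []
--
--     # Find peaks
--     peaks = []
--     for i in range(1, len(heights) - 1):
--         if heights[i] > heights[i - 1] and heights[i] > heights[i + 1]: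
--             peaks.append(heights[i])
--
--     # If no peaks are found
--     if not peaks:
--         return 0, []
--
--     # Determine the highest peak value
--     highest_peak = max(peaks)
--
--     # Filter only the highest peaks
--     highest_peaks = [peak for peak in peaks if peak == highest_peak]
--
--     return len(highest_peaks), highest_peaks
-- ===== SOURCE B (Python) =====
-- def find_highest_mountain_peaks(heights):
--     # Single pass: track the best peak value and its multiplicity; no
--     # intermediate peaks list, no separate max/filter passes.
--     if len(heights) < 3:
--         return 0, []
--     best = None
--     count = 0
--     for i in range(1, len(heights) - 1):
--         h = heights[i]
--         if h > heights[i - 1] and h > heights[i + 1]: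
--             if best is None or h > best:
--                 best, count = h, 1
--             elif h == best:
--                 count += 1
--     if best is None:
--         return 0, []
--     return count, [best] * count
-- ===== Notes on version B (the rewrite author's own statement) =====
-- stated objective: simpler
-- what changed: Replaces the build-a-peaks-list-then-max-then-filter pipeline by a single pass that maintains the running highest peak value and its count, reconstructing the output list by replication.
import Mathlib
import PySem

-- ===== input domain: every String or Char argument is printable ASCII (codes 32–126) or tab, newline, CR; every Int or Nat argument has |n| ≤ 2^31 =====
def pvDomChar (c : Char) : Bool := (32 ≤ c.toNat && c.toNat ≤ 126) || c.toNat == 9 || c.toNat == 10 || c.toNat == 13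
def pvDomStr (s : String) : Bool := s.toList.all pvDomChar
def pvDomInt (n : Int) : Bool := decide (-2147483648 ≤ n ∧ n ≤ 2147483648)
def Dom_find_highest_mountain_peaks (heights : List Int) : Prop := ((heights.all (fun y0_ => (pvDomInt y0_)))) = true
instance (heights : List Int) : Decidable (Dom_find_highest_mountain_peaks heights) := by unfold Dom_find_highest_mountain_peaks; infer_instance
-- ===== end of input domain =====

-- B replaces A's collect-peaks/max/filter pipeline by a single pass tracking the
-- running highest peak and its count (objective: simpler; same O(n) cost).

-- ===== PORT A =====
-- indices from range(1, len-1) are always in range, so pyGetD's default is never used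
def find_highest_mountain_peaks (heights : List Int) : Int × List Int :=
  if heights.length < 3 then (0, [])
  else
    let peaks := (PySem.List.pyRange 1 ((heights.length : Int) - 1) 1).foldl
      (fun ps i =>
        if PySem.List.pyGetD heights i 0 > PySem.List.pyGetD heights (i - 1) 0 ∧
           PySem.List.pyGetD heights i 0 > PySem.List.pyGetD heights (i + 1) 0
        then ps ++ [PySem.List.pyGetD heights i 0] else ps) []
    if peaks = [] then (0, [])
    else
      let highest_peak := (PySem.List.max? peaks (fun x => x)).getD 0
      let highest_peaks := peaks.filter (fun p => p == highest_peak)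
      ((highest_peaks.length : Int), highest_peaks)

-- ===== PORT B =====
-- the body of B's loop: on a peak h, update (best, count)
def pvAltStep (heights : List Int) (st : Option Int × Int) (i : Int) : Option Int × Int :=
  let h := PySem.List.pyGetD heights i 0
  if h > PySem.List.pyGetD heights (i - 1) 0 ∧ h > PySem.List.pyGetD heights (i + 1) 0 then
    match st with
    | (none, _) => (some h, 1)
    | (some b, c) => if h > b then (some h, 1) else if h = b then (some b, c + 1) else (some b, c)
  else st

def find_highest_mountain_peaks_alt (heights : List Int) : Int × List Int :=
  if heights.length < 3 then (0, [])
  else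
    match (PySem.List.pyRange 1 ((heights.length : Int) - 1) 1).foldl (pvAltStep heights) (none, 0) with
    | (none, _) => (0, [])
    | (some b, c) => (c, List.replicate c.toNat b)

-- ===== PRECONDITION & SPEC =====
def Spec_find_highest_mountain_peaks (heights : List Int) (out : Int × List Int) : Prop := out = find_highest_mountain_peaks_alt heights
instance (heights : List Int) (out : Int × List Int) : Decidable (Spec_find_highest_mountain_peaks heights out) := by unfold Spec_find_highest_mountain_peaks; infer_instance

-- ===== CLAIM (what is proved, stated in full; the proofs are below) =====
def Claim_equal_find_highest_mountain_peaks : Prop := ∀ (heights : List Int), Dom_find_highest_mountain_peaks heights → Spec_find_highest_mountain_peaks heights (find_highest_mountain_peaks heights)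

-- ===== LEMMAS AND PROOFS =====

-- B's (best, count) update, abstracted from the peak test
def pvUpd (st : Option Int × Int) (h : Int) : Option Int × Int :=
  match st with
  | (none, _) => (some h, 1)
  | (some b, c) => if h > b then (some h, 1) else if h = b then (some b, c + 1) else (some b, c)

-- the state B maintains is a fold of pvUpd over the peak values seen so far
def pvS (ps : List Int) : Option Int × Int := ps.foldl pvUpd (none, 0)

theorem pvAltStep_eq (heights : List Int) (ps : List Int) (i : Int) :
    pvAltStep heights (pvS ps) i =
      pvS (if PySem.List.pyGetD heights i 0 > PySem.List.pyGetD heights (i - 1) 0 ∧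
              PySem.List.pyGetD heights i 0 > PySem.List.pyGetD heights (i + 1) 0
           then ps ++ [PySem.List.pyGetD heights i 0] else ps) := by
  by_cases hp : PySem.List.pyGetD heights i 0 > PySem.List.pyGetD heights (i - 1) 0 ∧
      PySem.List.pyGetD heights i 0 > PySem.List.pyGetD heights (i + 1) 0
  · simp [pvAltStep, hp, pvS, List.foldl_append, pvUpd]
  · simp [pvAltStep, hp]

theorem pvFold_comm (heights : List Int) (l : List Int) (ps : List Int) :
    l.foldl (pvAltStep heights) (pvS ps) =
      pvS (l.foldl (fun ps i =>
        if PySem.List.pyGetD heights i 0 > PySem.List.pyGetD heights (i - 1) 0 ∧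
           PySem.List.pyGetD heights i 0 > PySem.List.pyGetD heights (i + 1) 0
        then ps ++ [PySem.List.pyGetD heights i 0] else ps) ps) := by
  induction l generalizing ps with
  | nil => rfl
  | cons x t ih =>
    simp only [List.foldl_cons, pvAltStep_eq]
    exact ih _

-- characterisation of B's state: best = running max of peaks, count = its multiplicity
theorem pvS_spec (ps : List Int) :
    pvS ps = match ps with
      | [] => (none, 0)
      | x :: t => (some (t.foldl max x), ((x :: t).count (t.foldl max x) : Int)) := by
  induction ps using List.reverseRecOn with
  | nil => rfl
  | append_singleton ps h ih =>
    cases ps with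
    | nil => simp [pvS, pvUpd]
    | cons x t =>
      have hS : pvS ((x :: t) ++ [h]) = pvUpd (pvS (x :: t)) h := by
        simp [pvS, List.foldl_append]
      rw [hS, ih]
      have hle : ∀ y ∈ x :: t, y ≤ t.foldl max x := by
        intro y hy
        rcases List.mem_cons.mp hy with rfl | hy
        · exact (PySem.List.le_foldl_max t y).1
        · exact (PySem.List.le_foldl_max t x).2 y hy
      rcases lt_trichotomy (t.foldl max x) h with hlt | heq | hgt
      · have hnot : h ∉ x :: t := fun hmem => absurd (hle h hmem) (not_le.mpr hlt)
        have hx : h ≠ x := fun hx => hnot (hx ▸ List.mem_cons_self)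
        have ht : h ∉ t := fun hmem => hnot (List.mem_cons_of_mem x hmem)
        simp [pvUpd, hlt, List.foldl_append, max_eq_right hlt.le, List.count_append,
          List.count_cons, List.count_eq_zero_of_not_mem ht, Ne.symm hx]
      · simp [pvUpd, heq, List.foldl_append, List.count_append, List.count_cons]
        omega
      · have hne : h ≠ t.foldl max x := ne_of_lt hgt
        simp [pvUpd, not_lt.mpr hgt.le, hne, List.foldl_append, max_eq_left hgt.le,
          List.count_append, List.count_cons]

-- filter for the max equals replicating it count-many times
theorem pvFilter_max (ps : List Int) (m : Int) :
    ps.filter (fun p => p == m) = List.replicate (ps.count m) m := by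
  induction ps with
  | nil => rfl
  | cons x t ih =>
    by_cases hx : x = m
    · subst hx; simp [ih, List.replicate_succ]
    · simp [hx, ih]

-- ===== VERDICT (by name: the statement is the Claim_ definition above) =====
theorem find_highest_mountain_peaks_spec : Claim_equal_find_highest_mountain_peaks := by
  intro heights _
  unfold Spec_find_highest_mountain_peaks find_highest_mountain_peaks find_highest_mountain_peaks_alt
  by_cases hlen : heights.length < 3
  · simp [hlen]
  · simp only [hlen, if_false]
    have hcomm := pvFold_comm heights (PySem.List.pyRange 1 ((heights.length : Int) - 1) 1) []
    simp only [pvS, List.foldl_nil] at hcomm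
    rw [hcomm]
    set ps := (PySem.List.pyRange 1 ((heights.length : Int) - 1) 1).foldl
      (fun ps i =>
        if PySem.List.pyGetD heights i 0 > PySem.List.pyGetD heights (i - 1) 0 ∧
           PySem.List.pyGetD heights i 0 > PySem.List.pyGetD heights (i + 1) 0
        then ps ++ [PySem.List.pyGetD heights i 0] else ps) [] with hps
    have hSspec := pvS_spec ps
    simp only [pvS] at hSspec
    rw [hSspec]
    cases ps with
    | nil => simp
    | cons x t =>
      simp only [List.cons_ne_nil, if_false, PySem.List.max?_id_cons, Option.getD_some]
      rw [pvFilter_max]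
      simp
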